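-- pv_equiv track=rewrite | github.com/iitkcpslab/OMCoRP | auction_application.py | check_collision_config
-- ===== SOURCE A (Python) =====
-- def check_collision_config(robot_config):
--     """
--     get all the locations from a config and estimate the set of th elocations.
--     if the cardinality of the set is less than the total locations, a collision
--     is detected.
--     If collision detected, then return 1
--     """
--     robot_location_all = []
--     for tmp_config in robot_config:
--         tmp_location = tmp_config['location']
--         robot_location_all.append(tmp_location)
--
--     robot_location_set = list(set(robot_location_all))
--
--     flag = 0
--     if(len(robot_location_all) > len(robot_location_set)):
--         flag = 1
--
--
--
--     return flag
-- ===== SOURCE B (Python) =====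
-- def check_collision_config(robot_config):
--     seen = set()
--     flag = 0
--     for tmp_config in robot_config:
--         loc = tmp_config['location']
--         if loc in seen:
--             flag = 1
--         else:
--             seen.add(loc)
--     return flag
-- ===== Notes on version B (the rewrite author's own statement) =====
-- stated objective: simpler
-- what changed: Single incremental pass with a 'seen' set and a flag, instead of building the full location list, materialising set(...) and comparing lengths; no early exit so a later missing-'location' KeyError still fires.
import Mathlib
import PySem

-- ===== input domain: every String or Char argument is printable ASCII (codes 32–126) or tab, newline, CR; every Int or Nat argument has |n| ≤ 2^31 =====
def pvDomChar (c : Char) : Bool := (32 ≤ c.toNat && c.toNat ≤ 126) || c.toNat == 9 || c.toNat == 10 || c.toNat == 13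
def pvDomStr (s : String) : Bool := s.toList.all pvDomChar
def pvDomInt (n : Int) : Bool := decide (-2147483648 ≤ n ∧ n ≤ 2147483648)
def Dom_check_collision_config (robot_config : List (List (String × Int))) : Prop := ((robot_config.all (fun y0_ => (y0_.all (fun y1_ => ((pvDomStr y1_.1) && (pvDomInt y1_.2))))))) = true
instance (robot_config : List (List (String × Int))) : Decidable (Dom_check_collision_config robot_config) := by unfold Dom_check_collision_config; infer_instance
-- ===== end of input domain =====

-- B replaces A's "collect all locations, materialise the set, compare lengths" with one
-- incremental pass maintaining a seen-set and a flag (same O(n) cost; simpler single scan).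


-- dict[str,int] arrives as an association list; 'location' lookup = first match (exact under unique keys)
def pvGetLoc (c : List (String × Int)) : Int :=
  ((c.find? (fun p => p.1 == "location")).map (fun p => p.2)).getD 0

-- ===== PORT A =====
-- tmp_config['location']: under Pre_ every dict has the key, so getD never takes its default
def check_collision_config (robot_config : List (List (String × Int))) : Int :=
  let robot_location_all :=
    robot_config.foldl (fun acc tmp_config => acc ++ [pvGetLoc tmp_config]) []
  let robot_location_set := PySem.Set.ofList robot_location_all
  if robot_location_all.length > robot_location_set.length then 1 else 0

-- ===== PORT B =====
def check_collision_config_alt (robot_config : List (List (String × Int))) : Int :=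
  (robot_config.foldl
    (fun (st : PySem.Set Int × Int) tmp_config =>
      let loc := pvGetLoc tmp_config
      if PySem.Set.contains st.1 loc then (st.1, 1) else (PySem.Set.add st.1 loc, st.2))
    (PySem.Set.empty, 0)).2

-- ===== PRECONDITION & SPEC =====
-- Pre_ excludes exactly the inputs where some config lacks the key 'location' (Python A raises KeyError there).
def Pre_check_collision_config (robot_config : List (List (String × Int))) : Prop :=
  ∀ tmp_config ∈ robot_config, (tmp_config.find? (fun p => p.1 == "location")).isSome = true
instance (robot_config : List (List (String × Int))) : Decidable (Pre_check_collision_config robot_config) := by unfold Pre_check_collision_config; infer_instance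
def pvWitness_check_collision_config : (List (List (String × Int))) := [[("location", 1)], [("location", 1)]]

def Spec_check_collision_config (robot_config : List (List (String × Int))) (out : Int) : Prop := out = check_collision_config_alt robot_config
instance (robot_config : List (List (String × Int))) (out : Int) : Decidable (Spec_check_collision_config robot_config out) := by unfold Spec_check_collision_config; infer_instance

-- ===== CLAIM (what is proved, stated in full; the proofs are below) =====
def Claim_equal_check_collision_config : Prop := ∀ (robot_config : List (List (String × Int))), Dom_check_collision_config robot_config → Pre_check_collision_config robot_config → Spec_check_collision_config robot_config (check_collision_config robot_config)

-- ===== LEMMAS AND PROOFS =====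

def pvStep (st : PySem.Set Int × Int) (x : Int) : PySem.Set Int × Int :=
  if PySem.Set.contains st.1 x then (st.1, 1) else (PySem.Set.add st.1 x, st.2)

lemma pvAppend_eq_map (l : List (List (String × Int))) (acc : List Int) :
    l.foldl (fun acc tmp_config => acc ++ [pvGetLoc tmp_config]) acc
      = acc ++ l.map (fun c => pvGetLoc c) := by
  induction l generalizing acc with
  | nil => simp
  | cons c rest ih => simp [List.foldl_cons, ih]

lemma pvUpdate_len_le (xs : List Int) (s : PySem.Set Int) :
    (PySem.Set.update s xs).length ≤ s.length + xs.length := by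
  induction xs generalizing s with
  | nil => simp [PySem.Set.update]
  | cons x rest ih =>
    have h := ih (PySem.Set.add s x)
    have hadd : (PySem.Set.add s x).length ≤ s.length + 1 := by
      unfold PySem.Set.add
      split <;> simp
    calc (PySem.Set.update s (x :: rest)).length
        = (PySem.Set.update (PySem.Set.add s x) rest).length := by
          simp [PySem.Set.update, List.foldl_cons]
      _ ≤ (PySem.Set.add s x).length + rest.length := h
      _ ≤ s.length + 1 + rest.length := by omega
      _ = s.length + (x :: rest).length := by simp; omega

lemma pvFlag_one (xs : List Int) (s : PySem.Set Int) :
    (xs.foldl pvStep (s, 1)).2 = 1 := by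
  induction xs generalizing s with
  | nil => rfl
  | cons x rest ih =>
    simp only [List.foldl_cons, pvStep]
    split <;> exact ih _

lemma pvMain (xs : List Int) (s : PySem.Set Int) :
    (if s.length + xs.length > (PySem.Set.update s xs).length then (1 : Int) else 0)
      = (xs.foldl pvStep (s, 0)).2 := by
  induction xs generalizing s with
  | nil => simp [PySem.Set.update]
  | cons x rest ih =>
    have hupd : PySem.Set.update s (x :: rest) = PySem.Set.update (PySem.Set.add s x) rest := by
      simp [PySem.Set.update, List.foldl_cons]
    rw [List.foldl_cons]
    by_cases hc : PySem.Set.contains s x = true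
    · rw [show pvStep (s, 0) x = (s, 1) by unfold pvStep; rw [if_pos hc], pvFlag_one]
      have hadd : PySem.Set.add s x = s := by unfold PySem.Set.add; rw [if_pos hc]
      have hle := pvUpdate_len_le rest s
      have hgt : s.length + (x :: rest).length > (PySem.Set.update s (x :: rest)).length := by
        rw [hupd, hadd]; simp only [List.length_cons]; omega
      rw [if_pos hgt]
    · rw [show pvStep (s, 0) x = (PySem.Set.add s x, 0) by unfold pvStep; rw [if_neg hc], ← ih]
      have hadd : PySem.Set.add s x = s ++ [x] := by unfold PySem.Set.add; rw [if_neg hc]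
      rw [hupd, hadd]
      have hlen : s.length + (x :: rest).length = (s ++ [x]).length + rest.length := by
        simp; omega
      rw [hlen]

-- ===== VERDICT (by name: the statement is the Claim_ definition above) =====
theorem check_collision_config_spec : Claim_equal_check_collision_config := by
  intro rc _ _
  unfold Spec_check_collision_config check_collision_config check_collision_config_alt
  rw [pvAppend_eq_map, List.nil_append]
  have hmap : rc.foldl
      (fun (st : PySem.Set Int × Int) tmp_config =>
        let loc := pvGetLoc tmp_config
        if PySem.Set.contains st.1 loc then (st.1, 1) else (PySem.Set.add st.1 loc, st.2))
      (PySem.Set.empty, 0)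
      = (rc.map (fun c => pvGetLoc c)).foldl pvStep (PySem.Set.empty, 0) := by
    rw [List.foldl_map]
    rfl
  rw [hmap, ← pvMain]
  have : PySem.Set.ofList (rc.map fun c => pvGetLoc c)
      = PySem.Set.update PySem.Set.empty (rc.map fun c => pvGetLoc c) := by
    rfl
  simp [this, PySem.Set.empty, gt_iff_lt]
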